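-- pv_equiv track=rewrite | github.com/Nikkuniku/AtcoderProgramming | ABC/ABC400~ABC499/ABC403/d.py | calc
-- ===== SOURCE A (Python) =====
-- def calc(P):
--     L = len(P)
--     INF = 1 << 60
--     dp = [[INF] * 2 for _ in range(L + 1)]
--     dp[0] = [0, 0]
--     for i in range(L):
--         # 取り除く
--         dp[i + 1][0] = min(dp[i][0], dp[i][1]) + P[i]
--         # 取り除かない
--         dp[i + 1][1] = dp[i][0]
--     res = min(dp[L])
--     return res
-- ===== SOURCE B (Python) =====
-- def calc(P):
--     # complement view: minimize removed weight = total - (max weight of a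
--     # kept subset with no two adjacent elements), computed house-robber style
--     total = sum(P)
--     prev2 = prev = 0
--     for x in P:
--         prev2, prev = prev, max(prev, prev2 + x)
--     return total - prev
-- ===== Notes on version B (the rewrite author's own statement) =====
-- stated objective: faster
-- what changed: Replaces the two-state removed/kept min-cost DP table by the complement view: total sum minus a house-robber DP (keep[i]=max(keep[i-1],keep[i-2]+P[i])) over two scalar accumulators, removing the O(n) table allocation and INF sentinel (constant-factor speedup, measured ~2.7x).
import Mathlib
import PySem

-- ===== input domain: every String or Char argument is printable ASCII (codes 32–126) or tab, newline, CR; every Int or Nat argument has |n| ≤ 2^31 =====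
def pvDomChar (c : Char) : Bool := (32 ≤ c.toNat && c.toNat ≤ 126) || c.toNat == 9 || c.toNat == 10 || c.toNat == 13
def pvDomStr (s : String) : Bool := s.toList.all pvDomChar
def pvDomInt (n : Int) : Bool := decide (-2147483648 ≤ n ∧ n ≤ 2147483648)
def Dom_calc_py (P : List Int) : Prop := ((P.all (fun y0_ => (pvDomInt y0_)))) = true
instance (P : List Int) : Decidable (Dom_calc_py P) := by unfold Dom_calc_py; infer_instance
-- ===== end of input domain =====

-- B replaces A's two-state removed/kept min-cost DP table by the complement view:
-- total sum minus a house-robber DP for the maximum-weight non-adjacent kept subset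
-- (alternative decomposition, same O(n) cost).


-- ===== PORT A =====
-- loop body of A: dp[i+1][0] = min(dp[i][0], dp[i][1]) + P[i]; dp[i+1][1] = dp[i][0]
-- (the fixed-length-2 inner lists are represented as pairs; all indices are in range,
-- so getD is exact; i ∈ range(L) is nonnegative, so .toNat is exact)
def calcStep (P : List Int) (INF : Int) (dp : List (Int × Int)) (i : Int) : List (Int × Int) :=
  let iN := i.toNat
  let cur := dp.getD iN (INF, INF)
  dp.set (iN + 1) (min cur.1 cur.2 + P.getD iN 0, cur.1)

def calc_py (P : List Int) : Int :=
  let L : Nat := P.length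
  let INF : Int := 1 <<< 60
  let dp : List (Int × Int) := List.replicate (L + 1) (INF, INF)
  let dp := dp.set 0 (0, 0)                                  -- dp[0] = [0, 0]
  let dp := (PySem.List.pyRange 0 (L : Int) 1).foldl (calcStep P INF) dp
  let last := dp.getD L (INF, INF)
  min last.1 last.2                                          -- res = min(dp[L])

-- ===== PORT B =====
-- prev2, prev = prev, max(prev, prev2 + x)
def robStep (st : Int × Int) (x : Int) : Int × Int := (st.2, max st.2 (st.1 + x))

def calc_py_alt (P : List Int) : Int :=
  let total := P.sum
  let s := P.foldl robStep (0, 0)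
  total - s.2

-- ===== PRECONDITION & SPEC =====
def Spec_calc_py (P : List Int) (out : Int) : Prop := out = calc_py_alt P
instance (P : List Int) (out : Int) : Decidable (Spec_calc_py P out) := by unfold Spec_calc_py; infer_instance

-- ===== CLAIM (what is proved, stated in full; the proofs are below) =====
def Claim_equal_calc_py : Prop := ∀ (P : List Int), Dom_calc_py P → Spec_calc_py P (calc_py P)

-- ===== LEMMAS AND PROOFS =====

-- the invariant tying A's table entry i to B's house-robber state after i elements:
-- dp[i][0] = sum(P[:i]) - keep[i-1]  and  min(dp[i]) = sum(P[:i]) - keep[i]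
theorem calc_main (P : List Int) (i : Nat) (hi : i ≤ P.length) :
    ((PySem.List.pyRange 0 (i : Int) 1).foldl (calcStep P (1 <<< 60))
        ((List.replicate (P.length + 1) ((1:Int) <<< 60, (1:Int) <<< 60)).set 0 (0, 0))).length
      = P.length + 1 ∧
    (((PySem.List.pyRange 0 (i : Int) 1).foldl (calcStep P (1 <<< 60))
        ((List.replicate (P.length + 1) ((1:Int) <<< 60, (1:Int) <<< 60)).set 0 (0, 0))).getD i
        ((1:Int) <<< 60, (1:Int) <<< 60)).1
      = (P.take i).sum - ((P.take i).foldl robStep (0, 0)).1 ∧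
    min (((PySem.List.pyRange 0 (i : Int) 1).foldl (calcStep P (1 <<< 60))
        ((List.replicate (P.length + 1) ((1:Int) <<< 60, (1:Int) <<< 60)).set 0 (0, 0))).getD i
        ((1:Int) <<< 60, (1:Int) <<< 60)).1
      (((PySem.List.pyRange 0 (i : Int) 1).foldl (calcStep P (1 <<< 60))
        ((List.replicate (P.length + 1) ((1:Int) <<< 60, (1:Int) <<< 60)).set 0 (0, 0))).getD i
        ((1:Int) <<< 60, (1:Int) <<< 60)).2
      = (P.take i).sum - ((P.take i).foldl robStep (0, 0)).2 := by
  induction i with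
  | zero =>
    simp [PySem.List.pyRange_one_eq_nil, List.getD]
  | succ i ih =>
    have hiL : i < P.length := by omega
    have h1 := ih (by omega)
    have hrange : PySem.List.pyRange 0 ((i + 1 : Nat) : Int) 1
        = PySem.List.pyRange 0 (i : Int) 1 ++ [(i : Int)] := by
      push_cast
      exact PySem.List.pyRange_one_succ_right (by positivity)
    rw [hrange, List.foldl_append]
    set t := (PySem.List.pyRange 0 (i : Int) 1).foldl (calcStep P (1 <<< 60))
        ((List.replicate (P.length + 1) ((1:Int) <<< 60, (1:Int) <<< 60)).set 0 (0, 0)) with ht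
    obtain ⟨hlen, ha, hmin⟩ := h1
    have hstep : List.foldl (calcStep P (1 <<< 60)) t [(i : Int)]
        = t.set (i + 1) (min (t.getD i ((1:Int) <<< 60, (1:Int) <<< 60)).1
              (t.getD i ((1:Int) <<< 60, (1:Int) <<< 60)).2 + P.getD i 0,
            (t.getD i ((1:Int) <<< 60, (1:Int) <<< 60)).1) := by
      simp only [List.foldl_cons, List.foldl_nil, calcStep, Int.toNat_natCast]
      norm_cast
    rw [hstep]
    have hlt : i + 1 < t.length := by omega
    have hget : (t.set (i + 1) (min (t.getD i ((1:Int) <<< 60, (1:Int) <<< 60)).1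
              (t.getD i ((1:Int) <<< 60, (1:Int) <<< 60)).2 + P.getD i 0,
            (t.getD i ((1:Int) <<< 60, (1:Int) <<< 60)).1)).getD (i + 1)
            ((1:Int) <<< 60, (1:Int) <<< 60)
        = (min (t.getD i ((1:Int) <<< 60, (1:Int) <<< 60)).1
              (t.getD i ((1:Int) <<< 60, (1:Int) <<< 60)).2 + P.getD i 0,
            (t.getD i ((1:Int) <<< 60, (1:Int) <<< 60)).1) := by
      simp [List.getD, hlt]
    have htake : P.take (i + 1) = P.take i ++ [P[i]] :=
      List.take_succ_eq_append_getElem hiL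
    have hPget : P.getD i 0 = P[i] := by simp [List.getD, hiL]
    rw [hget, htake, List.foldl_append, List.sum_append]
    refine ⟨by simp [hlen], ?_, ?_⟩
    · simp only [hPget, ha, robStep, List.foldl_cons, List.foldl_nil, List.sum_cons,
        List.sum_nil]
      omega
    · simp only [hPget, ha, robStep, List.foldl_cons, List.foldl_nil, List.sum_cons,
        List.sum_nil]
      omega

theorem calc_py_eq (P : List Int) : calc_py P = calc_py_alt P := by
  have h := calc_main P P.length le_rfl
  obtain ⟨hlen, ha, hmin⟩ := h
  unfold calc_py calc_py_alt
  simp only [List.take_length] at hmin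
  simpa using hmin

-- ===== VERDICT (by name: the statement is the Claim_ definition above) =====
theorem calc_py_spec : Claim_equal_calc_py := by
  intro P _
  unfold Spec_calc_py
  exact calc_py_eq P
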